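-- pv_equiv track=rewrite | github.com/peoplenarthax/code-challenges | hackerrank/search/triplets.py | slow_triplets
-- ===== SOURCE A (Python) =====
-- def slow_triplets(a, b, c):
--     a = sorted(list(set(a)))
--     b = sorted(list(set(b)))
--     c = sorted(list(set(c)))
--
--     total_count = 0
--     for i in range(len(b)):
--         val = b[i]
--
--         count_a = 0
--         for i in range(len(a)):
--             if val < a[i]:
--                 break
--             count_a += 1
--         count_c = 0
--         for i in range(len(c)):
--             if val < c[i]:
--                 break
--             count_c += 1
--
--         total_count += count_a*count_c
--
--     return total_count
-- ===== SOURCE B (Python) =====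
-- def slow_triplets(a, b, c):
--     def bisect_right(xs, val):
--         lo, hi = 0, len(xs)
--         while lo < hi:
--             mid = (lo + hi) // 2
--             if val < xs[mid]:
--                 hi = mid
--             else:
--                 lo = mid + 1
--         return lo
--
--     sa = sorted(set(a))
--     sb = sorted(set(b))
--     sc = sorted(set(c))
--     return sum(bisect_right(sa, v) * bisect_right(sc, v) for v in sb)
-- ===== Notes on version B (the rewrite author's own statement) =====
-- stated objective: faster
-- what changed: Replaces A's linear scan of a and c for every value of b with a hand-written binary search (bisect_right) on the sorted deduplicated lists, and folds the products with sum over a generator.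
import Mathlib
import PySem

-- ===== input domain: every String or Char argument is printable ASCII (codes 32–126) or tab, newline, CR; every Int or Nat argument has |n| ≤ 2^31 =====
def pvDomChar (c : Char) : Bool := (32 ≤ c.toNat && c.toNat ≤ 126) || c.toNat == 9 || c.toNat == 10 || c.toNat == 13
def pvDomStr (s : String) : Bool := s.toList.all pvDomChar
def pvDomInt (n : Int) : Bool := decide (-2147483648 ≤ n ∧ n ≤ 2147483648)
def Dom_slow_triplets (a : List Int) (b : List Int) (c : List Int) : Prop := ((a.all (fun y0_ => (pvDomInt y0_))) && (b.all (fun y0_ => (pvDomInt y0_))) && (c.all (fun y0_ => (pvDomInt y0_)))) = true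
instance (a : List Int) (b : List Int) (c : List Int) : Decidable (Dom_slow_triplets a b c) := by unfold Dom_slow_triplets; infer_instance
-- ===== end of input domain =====

-- ===== PORT A =====
-- B replaces A's per-b-value linear scans of a and c with binary search on the sorted deduplicated lists (objective: faster).
-- Port of A's inner loop `for i in range(len(xs)): if val < xs[i]: break; count += 1`
def slowCount (val : Int) (xs : List Int) (acc : Int) : Int :=
  match xs with
  | [] => acc
  | x :: rest => if val < x then acc else slowCount val rest (acc + 1)

def slow_triplets (a : List Int) (b : List Int) (c : List Int) : Int :=
  let sa := PySem.List.sorted (PySem.Set.ofList a) (fun x => x) false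
  let sb := PySem.List.sorted (PySem.Set.ofList b) (fun x => x) false
  let sc := PySem.List.sorted (PySem.Set.ofList c) (fun x => x) false
  sb.foldl (fun total val => total + slowCount val sa 0 * slowCount val sc 0) 0

-- ===== PORT B =====
-- Source B's hand-written bisect_right is the standard bisect.bisect_right loop, ported as PySem.List.bisectRight.
def slow_triplets_alt (a : List Int) (b : List Int) (c : List Int) : Int :=
  let sa := PySem.List.sorted (PySem.Set.ofList a) (fun x => x) false
  let sb := PySem.List.sorted (PySem.Set.ofList b) (fun x => x) false
  let sc := PySem.List.sorted (PySem.Set.ofList c) (fun x => x) false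
  (sb.map (fun v => (PySem.List.bisectRight sa v : Int) * (PySem.List.bisectRight sc v : Int))).sum

-- ===== PRECONDITION & SPEC =====
def Spec_slow_triplets (a : List Int) (b : List Int) (c : List Int) (out : Int) : Prop := out = slow_triplets_alt a b c
instance (a : List Int) (b : List Int) (c : List Int) (out : Int) : Decidable (Spec_slow_triplets a b c out) := by unfold Spec_slow_triplets; infer_instance

-- ===== CLAIM (what is proved, stated in full; the proofs are below) =====
def Claim_equal_slow_triplets : Prop := ∀ (a : List Int) (b : List Int) (c : List Int), Dom_slow_triplets a b c → Spec_slow_triplets a b c (slow_triplets a b c)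

-- ===== LEMMAS AND PROOFS =====

-- the accumulator of A's counting loop is additive
theorem slowCount_acc (val : Int) (xs : List Int) (acc : Int) :
    slowCount val xs acc = acc + slowCount val xs 0 := by
  induction xs generalizing acc with
  | nil => simp [slowCount]
  | cons x rest ih =>
    simp only [slowCount]
    split
    · simp
    · rw [ih (acc + 1), ih (0 + 1)]; ring

-- on a ≤-sorted list, A's scan-until-greater counts the elements ≤ val
theorem slowCount_eq_countP (val : Int) (xs : List Int)
    (hs : List.Pairwise (fun u v => u ≤ v) xs) :
    slowCount val xs 0 = (xs.countP (fun x => decide (x ≤ val)) : Int) := by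
  induction xs with
  | nil => simp [slowCount]
  | cons x rest ih =>
    rcases List.pairwise_cons.mp hs with ⟨hx, hrest⟩
    by_cases h : val < x
    · have hz : rest.countP (fun x => decide (x ≤ val)) = 0 := by
        rw [List.countP_eq_zero]
        intro y hy
        simp only [decide_eq_true_eq]
        exact not_le.mpr (lt_of_lt_of_le h (hx y hy))
      simp [slowCount, h, hz, not_le.mpr h]
    · have hxle : x ≤ val := not_lt.mp h
      simp only [slowCount, if_neg h]
      rw [slowCount_acc, ih hrest, List.countP_cons]
      simp [hxle]
      ring

-- any number with bisectRight's bracketing properties is the countP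
theorem countP_eq_of_bracket (val : Int) (xs : List Int) (r : Nat)
    (hr : r ≤ xs.length)
    (hlow : ∀ (j : Nat) (hj : j < xs.length), j < r → xs[j] ≤ val)
    (hhigh : ∀ (j : Nat) (hj : j < xs.length), r ≤ j → val < xs[j]) :
    xs.countP (fun x => decide (x ≤ val)) = r := by
  have hsplit : xs = xs.take r ++ xs.drop r := (List.take_append_drop r xs).symm
  rw [hsplit, List.countP_append]
  have h1 : (xs.take r).countP (fun x => decide (x ≤ val)) = r := by
    have hall : ∀ y ∈ xs.take r, (fun x => decide (x ≤ val)) y = true := by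
      intro y hy
      rcases List.mem_iff_getElem.mp hy with ⟨j, hj, rfl⟩
      have hjr : j < r := lt_of_lt_of_le hj (by simpa using List.length_take_le r xs)
      have hjlen : j < xs.length := lt_of_lt_of_le hjr hr
      rw [List.getElem_take]
      simpa using hlow j hjlen hjr
    rw [List.countP_eq_length.mpr hall, List.length_take]
    omega
  have h2 : (xs.drop r).countP (fun x => decide (x ≤ val)) = 0 := by
    rw [List.countP_eq_zero]
    intro y hy
    rcases List.mem_iff_getElem.mp hy with ⟨j, hj, rfl⟩
    rw [List.getElem_drop]
    have hj' : j < xs.length - r := by simpa using hj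
    have hjlen : r + j < xs.length := by omega
    simpa using not_le.mpr (hhigh (r + j) hjlen (Nat.le_add_right r j))
  omega

theorem bisectRight_eq_countP (val : Int) (xs : List Int)
    (hs : List.Pairwise (fun u v => u ≤ v) xs) :
    PySem.List.bisectRight xs val = xs.countP (fun x => decide (x ≤ val)) := by
  rcases PySem.List.bisectRight_spec xs val hs with ⟨hr, hlow, hhigh⟩
  exact (countP_eq_of_bracket val xs _ hr hlow hhigh).symm

-- both counts agree on a ≤-sorted list
theorem count_agree (val : Int) (xs : List Int)
    (hs : List.Pairwise (fun u v => u ≤ v) xs) :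
    slowCount val xs 0 = (PySem.List.bisectRight xs val : Int) := by
  rw [slowCount_eq_countP val xs hs, bisectRight_eq_countP val xs hs]

-- left fold of additions is the sum of the mapped list
theorem foldl_add_eq_sum_map (f : Int → Int) (xs : List Int) (acc : Int) :
    xs.foldl (fun t v => t + f v) acc = acc + (xs.map f).sum := by
  induction xs generalizing acc with
  | nil => simp
  | cons x rest ih => simp [List.foldl_cons, ih]; ring

-- ===== VERDICT (by name: the statement is the Claim_ definition above) =====
theorem slow_triplets_spec : Claim_equal_slow_triplets := by
  intro a b c _
  unfold Spec_slow_triplets slow_triplets slow_triplets_alt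
  simp only []
  have ha := PySem.List.sorted_pairwise (PySem.Set.ofList a) (fun x : Int => x) 
  have hc := PySem.List.sorted_pairwise (PySem.Set.ofList c) (fun x : Int => x)
  rw [foldl_add_eq_sum_map]
  simp only [zero_add]
  congr 1
  apply List.map_congr_left
  intro v _
  rw [count_agree v _ ha, count_agree v _ hc]
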